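-- pv_equiv track=rewrite | github.com/peteromallet/ArtAgents | astrid/packs/builtin/hype/run.py | cmd_safe
-- ===== SOURCE A (Python) =====
-- def cmd_safe(cmd: list[str]) -> list[str]:
--     safe: list[str] = []
--     skip_next = False
--     for token in cmd:
--         if skip_next:
--             safe.append("<redacted>")
--             skip_next = False
--             continue
--         safe.append(token)
--         if token in {"--env-file", "--api-key", "--token", "--password"}:
--             skip_next = True
--     return safe
-- ===== SOURCE B (Python) =====
-- FLAGS = {"--env-file", "--api-key", "--token", "--password"}
--
-- def cmd_safe(cmd: list[str]) -> list[str]: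
--     # Two staged passes: first mark the indices to hide, then rebuild the list.
--     # A token already marked as a secret is not re-checked as a flag
--     # (the `i not in redacted` guard), matching A's skip semantics.
--     redacted: set[int] = set()
--     for i, tok in enumerate(cmd):
--         if i not in redacted and tok in FLAGS:
--             redacted.add(i + 1)
--     return ["<redacted>" if i in redacted else tok for i, tok in enumerate(cmd)]
-- ===== Notes on version B (the rewrite author's own statement) =====
-- stated objective: alternative
-- what changed: Replaces A's single flag-carrying loop with two staged passes: a first enumerate pass that collects a set of indices to redact (guarded so a marked secret is never re-checked as a flag), then a comprehension that rebuilds the list from that index set.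
import Mathlib
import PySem

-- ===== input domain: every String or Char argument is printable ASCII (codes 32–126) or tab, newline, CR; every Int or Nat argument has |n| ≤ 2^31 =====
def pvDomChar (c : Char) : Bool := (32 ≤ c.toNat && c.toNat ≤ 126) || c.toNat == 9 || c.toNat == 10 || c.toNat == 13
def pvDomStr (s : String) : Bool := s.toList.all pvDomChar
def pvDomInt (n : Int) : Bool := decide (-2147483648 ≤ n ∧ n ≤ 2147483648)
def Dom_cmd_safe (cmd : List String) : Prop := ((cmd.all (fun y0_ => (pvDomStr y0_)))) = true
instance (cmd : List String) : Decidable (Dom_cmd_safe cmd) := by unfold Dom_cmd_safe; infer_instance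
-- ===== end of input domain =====

-- B replaces A's single flag-carrying loop by two staged passes: a first pass collecting
-- the set of indices to redact, then a rebuild pass keyed on that set (objective: alternative decomposition).


-- membership in the literal set {"--env-file", "--api-key", "--token", "--password"}
def pvIsFlag (t : String) : Bool :=
  t == "--env-file" || t == "--api-key" || t == "--token" || t == "--password"

-- ===== PORT A =====
-- A's loop over cmd with state (safe, skip_next)
def cmd_safe (cmd : List String) : List String :=
  (cmd.foldl
    (fun (st : List String × Bool) token =>
      if st.2 then
        (st.1 ++ ["<redacted>"], false)
      else
        (st.1 ++ [token], pvIsFlag token))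
    ([], false)).1

-- ===== PORT B =====
-- Source B's first pass: 'if i not in redacted and tok in FLAGS: redacted.add(i + 1)'
def pvMark (s : PySem.Set Int) (p : Int × String) : PySem.Set Int :=
  if !PySem.Set.contains s p.1 && pvIsFlag p.2 then PySem.Set.add s (p.1 + 1) else s

-- Source B: build the index set over enumerate(cmd), then rebuild by comprehension over enumerate(cmd)
def cmd_safe_alt (cmd : List String) : List String :=
  let redacted := (PySem.List.enumerate cmd).foldl pvMark PySem.Set.empty
  (PySem.List.enumerate cmd).map
    (fun p => if PySem.Set.contains redacted p.1 then "<redacted>" else p.2)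

-- ===== PRECONDITION & SPEC =====
def Spec_cmd_safe (cmd : List String) (out : List String) : Prop := out = cmd_safe_alt cmd
instance (cmd : List String) (out : List String) : Decidable (Spec_cmd_safe cmd out) := by unfold Spec_cmd_safe; infer_instance

-- ===== CLAIM (what is proved, stated in full; the proofs are below) =====
def Claim_equal_cmd_safe : Prop := ∀ (cmd : List String), Dom_cmd_safe cmd → Spec_cmd_safe cmd (cmd_safe cmd)

-- ===== LEMMAS AND PROOFS =====

-- A's loop, written as a recursion on (skip_next, remaining tokens)
def goA : Bool → List String → List String
  | _, [] => []
  | true, _ :: rest => "<redacted>" :: goA false rest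
  | false, t :: rest => t :: goA (pvIsFlag t) rest

theorem cmd_safe_foldl (l : List String) (acc : List String) (skip : Bool) :
    (l.foldl
      (fun (st : List String × Bool) token =>
        if st.2 then
          (st.1 ++ ["<redacted>"], false)
        else
          (st.1 ++ [token], pvIsFlag token))
      (acc, skip)).1 = acc ++ goA skip l := by
  induction l generalizing acc skip with
  | nil => simp [goA]
  | cons t rest ih =>
    cases skip
    · simp only [goA]
      cases h : pvIsFlag t <;> simp [ih, h]
    · simp [goA, ih]

-- the mark-fold only adds indices strictly above the current position
theorem mark_fold_mem_le (l : List String) (i : Int) (s : PySem.Set Int) (j : Int)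
    (hj : j ≤ i) :
    (j ∈ (PySem.List.enumerate l i).foldl pvMark s) ↔ j ∈ s := by
  induction l generalizing i s with
  | nil => simp [PySem.List.enumerate]
  | cons t rest ih =>
    rw [PySem.List.enumerate_cons, List.foldl_cons]
    rw [ih (i + 1) _ (by omega)]
    unfold pvMark
    split
    · rw [PySem.Set.mem_add]
      constructor
      · rintro (h | h)
        · exact h
        · omega
      · exact Or.inl
    · rfl

-- core invariant: if s records exactly the skip state at position i and marks nothing beyond i,
-- then rebuilding from the completed mark-fold reproduces A's sequential loop
theorem main_lemma (l : List String) (i : Int) (s : PySem.Set Int) (skip : Bool)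
    (hcur : (i ∈ s) = (skip = true))
    (hfut : ∀ j, i < j → j ∉ s) :
    (PySem.List.enumerate l i).map
      (fun p =>
        if PySem.Set.contains ((PySem.List.enumerate l i).foldl pvMark s) p.1 then "<redacted>"
        else p.2)
      = goA skip l := by
  induction l generalizing i s skip with
  | nil => simp [PySem.List.enumerate, goA]
  | cons t rest ih =>
    rw [PySem.List.enumerate_cons, List.foldl_cons, List.map_cons]
    have hhead : PySem.Set.contains ((PySem.List.enumerate rest (i + 1)).foldl pvMark (pvMark s (i, t))) i = skip := by
      have h1 : (i ∈ (PySem.List.enumerate rest (i + 1)).foldl pvMark (pvMark s (i, t))) ↔ i ∈ pvMark s (i, t) :=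
        mark_fold_mem_le rest (i + 1) _ i (by omega)
      have h2 : (i ∈ pvMark s (i, t)) ↔ i ∈ s := by
        unfold pvMark
        split
        · rw [PySem.Set.mem_add]
          constructor
          · rintro (h | h)
            · exact h
            · omega
          · exact Or.inl
        · rfl
      cases hskip : skip with
      | true =>
        rw [PySem.Set.contains_iff, h1, h2]
        rw [hcur, hskip]
      | false =>
        rw [Bool.eq_false_iff]
        intro h
        rw [PySem.Set.contains_iff, h1, h2, hcur, hskip] at h
        exact absurd h (by simp)
    rw [hhead]
    cases hskip : skip with
    | true =>
      -- s.contains i = true so the guard fails: pvMark s (i, t) = s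
      have hmem : i ∈ s := by rw [hcur, hskip]
      have hm : pvMark s (i, t) = s := by
        unfold pvMark
        simp [hmem]
      rw [hm]
      rw [goA]
      refine congrArg _ ?_
      exact ih (i + 1) s false (by simp [hfut (i + 1) (by omega)]) (fun j hj => hfut j (by omega))
    | false =>
      rw [goA]
      refine congrArg _ ?_
      have hsi : PySem.Set.contains s i = false := by
        rw [Bool.eq_false_iff]
        intro h
        rw [PySem.Set.contains_iff] at h
        rw [hcur] at h; exact absurd h (by simp [hskip])
      cases hf : pvIsFlag t with
      | true =>
        have hnot : i ∉ s := by
          intro h; rw [hcur, hskip] at h; exact absurd h (by simp)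
        have hm : pvMark s (i, t) = PySem.Set.add s (i + 1) := by
          unfold pvMark; simp [hnot, hf]
        rw [hm]
        exact ih (i + 1) _ true
          (by simp [PySem.Set.mem_add])
          (fun j hj => by
            rw [PySem.Set.mem_add]
            rintro (h | h)
            · exact hfut j (by omega) h
            · omega)
      | false =>
        have hm : pvMark s (i, t) = s := by unfold pvMark; simp [hf]
        rw [hm]
        exact ih (i + 1) s false
          (by simp [hfut (i + 1) (by omega)])
          (fun j hj => hfut j (by omega))

-- ===== VERDICT (by name: the statement is the Claim_ definition above) =====
theorem cmd_safe_spec : Claim_equal_cmd_safe := by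
  intro cmd _
  show cmd_safe cmd = cmd_safe_alt cmd
  unfold cmd_safe cmd_safe_alt
  rw [cmd_safe_foldl, main_lemma cmd 0 PySem.Set.empty false (by simp [PySem.Set.empty]) (by simp [PySem.Set.empty])]
  rfl
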